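-- pv_equiv track=rewrite | github.com/noeticanlabs/cnsc-haai | src/cnsc_haai/gmi/lyapunov.py | _grad_energy
-- ===== SOURCE A (Python) =====
-- from typing import List
--
-- def _grad_energy(grid: List[List[int]]) -> int:
--     """
--     Compute gradient energy: sum of squared forward differences.
--
--     |grad(grid)|^2 = sum of ((grid[i+1][j] - grid[i][j])^2 + (grid[i][j+1] - grid[i][j])^2)
--
--     Args:
--         grid: 2D integer array
--
--     Returns:
--         Integer gradient energy
--     """
--     n = len(grid)
--     m = len(grid[0]) if n > 0 else 0
--     s = 0
--     for i in range(n):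
--         for j in range(m):
--             if i + 1 < n:
--                 d = grid[i + 1][j] - grid[i][j]
--                 s += d * d
--             if j + 1 < m:
--                 d = grid[i][j + 1] - grid[i][j]
--                 s += d * d
--     return s
-- ===== SOURCE B (Python) =====
-- from typing import List
--
-- def _grad_energy(grid: List[List[int]]) -> int:
--     """One 1-D adjacent-difference helper applied along both axes: energy of each
--     row (truncated to the first row's width) plus energy of each transposed column."""
--     m = len(grid[0]) if grid else 0
--     rows = [row[:m] for row in grid]
--
--     def seq_energy(xs):
--         return sum((b - a) * (b - a) for a, b in zip(xs, xs[1:]))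
--
--     return sum(seq_energy(r) for r in rows) + sum(seq_energy(c) for c in zip(*rows))
-- ===== Notes on version B (the rewrite author's own statement) =====
-- stated objective: simpler
-- what changed: A's guarded double loop over index pairs is replaced by a single 1-D adjacent-difference helper applied along both axes: to each row (truncated to the first row's width) and, after transposing the grid with zip(*rows), to each column.
import Mathlib
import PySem

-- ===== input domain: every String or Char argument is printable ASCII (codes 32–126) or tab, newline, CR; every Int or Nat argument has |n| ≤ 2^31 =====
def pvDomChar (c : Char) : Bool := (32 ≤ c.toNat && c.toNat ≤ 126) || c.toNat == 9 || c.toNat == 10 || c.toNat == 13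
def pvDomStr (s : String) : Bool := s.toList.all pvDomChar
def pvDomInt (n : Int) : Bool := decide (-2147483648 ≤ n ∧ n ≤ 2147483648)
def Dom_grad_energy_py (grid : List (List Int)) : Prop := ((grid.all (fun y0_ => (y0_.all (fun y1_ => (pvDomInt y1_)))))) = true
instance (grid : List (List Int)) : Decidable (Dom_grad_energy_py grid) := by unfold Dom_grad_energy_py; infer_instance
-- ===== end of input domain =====

-- B replaces A's guarded double loop by one 1-D adjacent-difference helper applied
-- along both axes: to each row (truncated to the first row's width) and, after
-- transposing with zip(*rows), to each column; objective: simpler.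

-- ===== PORT A =====
-- literal port of A's guarded double loop; pyGetD is exact here because Pre_ keeps
-- every index in range
def grad_energy_py (grid : List (List Int)) : Int :=
  let n : Int := grid.length
  let m : Int := if n > 0 then ((PySem.List.pyGetD grid 0 []).length : Int) else 0
  (PySem.List.pyRange 0 n 1).foldl (fun s i =>
    (PySem.List.pyRange 0 m 1).foldl (fun s j =>
      let s := if i + 1 < n then
          let d := PySem.List.pyGetD (PySem.List.pyGetD grid (i+1) []) j 0
                   - PySem.List.pyGetD (PySem.List.pyGetD grid i []) j 0
          s + d * d
        else s
      if j + 1 < m then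
        let d := PySem.List.pyGetD (PySem.List.pyGetD grid i []) (j+1) 0
                 - PySem.List.pyGetD (PySem.List.pyGetD grid i []) j 0
        s + d * d
      else s) s) 0

-- ===== PORT B =====
-- seq_energy(xs) = sum((b-a)*(b-a) for a, b in zip(xs, xs[1:]))
def pvSeqEnergy (xs : List Int) : Int :=
  ((xs.zip (PySem.List.slice xs (some 1) none)).map (fun p => (p.2 - p.1) * (p.2 - p.1))).sum

-- zip(*rows): truncates to the shortest row; exact because every index j < k is in
-- range of every row, so getD never reaches its default
def pvZipStar (rows : List (List Int)) : List (List Int) :=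
  match rows with
  | [] => []
  | r :: t =>
    let k := t.foldl (fun k x => min k x.length) r.length
    (List.range k).map (fun j => (r :: t).map (fun row => row.getD j 0))

def grad_energy_py_alt (grid : List (List Int)) : Int :=
  let m : Int := if grid.isEmpty then 0 else ((grid.headD []).length : Int)
  let rows := grid.map (fun row => PySem.List.slice row none (some m))
  (rows.map pvSeqEnergy).sum + ((pvZipStar rows).map pvSeqEnergy).sum

-- ===== PRECONDITION & SPEC =====
-- Pre_ excludes exactly the ragged grids on which the Python A raises IndexError:
-- grids with some row shorter than the first row (m = len(grid[0])).
def Pre_grad_energy_py (grid : List (List Int)) : Prop :=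
  ∀ row ∈ grid, (grid.headD []).length ≤ row.length
instance (grid : List (List Int)) : Decidable (Pre_grad_energy_py grid) := by
  unfold Pre_grad_energy_py; infer_instance

def pvWitness_grad_energy_py : List (List Int) := [[1, 2], [4, 0], [3, 3]]

def Spec_grad_energy_py (grid : List (List Int)) (out : Int) : Prop := out = grad_energy_py_alt grid
instance (grid : List (List Int)) (out : Int) : Decidable (Spec_grad_energy_py grid out) := by unfold Spec_grad_energy_py; infer_instance

-- ===== CLAIM (what is proved, stated in full; the proofs are below) =====
def Claim_equal_grad_energy_py : Prop := ∀ (grid : List (List Int)), Dom_grad_energy_py grid → Pre_grad_energy_py grid → Spec_grad_energy_py grid (grad_energy_py grid)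

-- ===== LEMMAS AND PROOFS =====

-- per-row sums of squared horizontal / vertical differences (proof-only abbreviations)
def pvH (m : Nat) (row : List Int) : Int :=
  ((List.range (m - 1)).map (fun j => (row.getD (j+1) 0 - row.getD j 0) * (row.getD (j+1) 0 - row.getD j 0))).sum
def pvV (m : Nat) (a b : List Int) : Int :=
  ((List.range m).map (fun j => (b.getD j 0 - a.getD j 0) * (b.getD j 0 - a.getD j 0))).sum

-- a fold whose body adds two independently guarded terms, as a sum
theorem pv_foldl_two_ite {α : Type} (L : List α) (c1 : Prop) [Decidable c1]
    (c2 : α → Prop) [∀ x, Decidable (c2 x)] (f g : α → Int) (s : Int) :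
    L.foldl (fun s j => if c2 j then (if c1 then s + f j else s) + g j
                        else (if c1 then s + f j else s)) s
    = s + (L.map (fun j => (if c1 then f j else 0) + (if c2 j then g j else 0))).sum := by
  induction L generalizing s with
  | nil => simp
  | cons x t ih =>
    simp only [List.foldl_cons, List.map_cons, List.sum_cons, ih]
    split_ifs <;> ring

theorem pv_sum_map_add {α : Type} (L : List α) (f g : α → Int) :
    (L.map (fun x => f x + g x)).sum = (L.map f).sum + (L.map g).sum := by
  induction L with
  | nil => simp
  | cons x t ih => simp only [List.map_cons, List.sum_cons, ih]; ring

theorem pv_sum_ite_const {α : Type} (L : List α) (c : Prop) [Decidable c] (f : α → Int) :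
    (L.map (fun x => if c then f x else 0)).sum = if c then (L.map f).sum else 0 := by
  by_cases h : c <;> simp [h]

-- A's guarded sum over range m is an unguarded sum over range (m-1)
theorem pv_sum_range_pred (m : Nat) (f : Nat → Int) :
    ((List.range m).map (fun j => if j + 1 < m then f j else 0)).sum
    = ((List.range (m - 1)).map f).sum := by
  cases m with
  | zero => simp
  | succ k =>
    rw [List.range_succ]
    simp only [List.map_append, List.sum_append, List.map_cons, List.map_nil,
      List.sum_cons, List.sum_nil]
    have h : (List.range k).map (fun j => if j + 1 < k + 1 then f j else 0)
        = (List.range k).map f := by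
      apply List.map_congr_left
      intro j hj
      simp only [List.mem_range] at hj
      simp [Nat.succ_lt_succ hj]
    rw [h]; simp

-- A as one arithmetic sum over row indices
theorem pv_A_eq (r : List Int) (t : List (List Int)) :
    grad_energy_py (r :: t) =
    ((List.range (r :: t).length).map (fun i =>
        (if i + 1 < (r :: t).length then pvV r.length ((r :: t).getD i []) ((r :: t).getD (i + 1) []) else 0)
        + pvH r.length ((r :: t).getD i []))).sum := by
  unfold grad_energy_py
  simp only [PySem.List.pyGetD_zero_cons, List.length_cons]
  rw [if_pos (by positivity)]
  rw [PySem.List.pyRange_zero_natCast (t.length+1), PySem.List.pyRange_zero_natCast r.length]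
  simp only [List.foldl_map]
  simp only [← Nat.cast_add_one, Nat.cast_lt, PySem.List.pyGetD_natCast]
  simp only [pv_foldl_two_ite]
  simp only [PySem.List.foldl_add]
  rw [zero_add]
  congr 1
  apply List.map_congr_left
  intro i _
  rw [pv_sum_map_add, pv_sum_ite_const, pv_sum_range_pred]
  rfl

-- taking the first m entries does not change entries the energies read
theorem pv_getD_take (xs : List Int) (m j : Nat) (h : j < m) :
    (xs.take m).getD j 0 = xs.getD j 0 := by
  simp [List.getD, h]

theorem pv_getD_map_col (rows : List (List Int)) (i j : Nat) :
    ((rows.map (fun row => row.getD j 0)).getD i 0) = (rows.getD i []).getD j 0 := by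
  rcases Nat.lt_or_ge i rows.length with h | h
  · simp [List.getD, List.getElem?_eq_getElem h]
  · rw [List.getD_eq_default _ _ (by simpa using h), List.getD_eq_default _ _ h]; simp

theorem pv_getD_map_take (L : List (List Int)) (m i : Nat) :
    ((L.map (fun row => row.take m)).getD i []) = (L.getD i []).take m := by
  rcases Nat.lt_or_ge i L.length with h | h
  · simp [List.getD, List.getElem?_eq_getElem h]
  · rw [List.getD_eq_default _ _ (by simpa using h), List.getD_eq_default _ _ h]; simp

theorem pv_zip_tail (xs : List Int) :
    xs.zip xs.tail = (List.range (xs.length - 1)).map (fun j => (xs.getD j 0, xs.getD (j+1) 0)) := by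
  apply List.ext_getElem
  · simp
  · intro i h1 h2
    simp only [List.length_zip, List.length_tail] at h1
    simp only [List.getElem_zip, List.getElem_tail, List.getElem_map, List.getElem_range]
    rw [List.getD_eq_getElem xs 0 (by omega : i < xs.length),
        List.getD_eq_getElem xs 0 (by omega : i + 1 < xs.length)]

-- the 1-D helper is exactly pvH at the list's own length
theorem pv_seq_eq (xs : List Int) : pvSeqEnergy xs = pvH xs.length xs := by
  unfold pvSeqEnergy pvH
  rw [PySem.List.slice_from_one, pv_zip_tail, List.map_map]
  rfl

theorem pvH_take (m : Nat) (xs : List Int) : pvH m (xs.take m) = pvH m xs := by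
  unfold pvH
  congr 1
  apply List.map_congr_left
  intro j hj
  simp only [List.mem_range] at hj
  rw [pv_getD_take xs m j (by omega), pv_getD_take xs m (j+1) (by omega)]

theorem pv_sum_comm {α β : Type} (L1 : List α) (L2 : List β) (f : α → β → Int) :
    (L1.map (fun a => (L2.map (f a)).sum)).sum = (L2.map (fun b => (L1.map (fun a => f a b)).sum)).sum := by
  induction L1 with
  | nil => simp
  | cons x t ih =>
    simp only [List.map_cons, List.sum_cons, ih, ← pv_sum_map_add]

theorem pv_foldl_min_const (L : List (List Int)) (mN : Nat)
    (h : ∀ x ∈ L, x.length = mN) :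
    L.foldl (fun k x => min k x.length) mN = mN := by
  induction L with
  | nil => rfl
  | cons x t ih =>
    simp only [List.foldl_cons, h x List.mem_cons_self, min_self]
    exact ih (fun y hy => h y (List.mem_cons_of_mem x hy))

theorem pv_sum_map_eq_range (L : List (List Int)) (f : List Int → Int) :
    (L.map f).sum = ((List.range L.length).map (fun i => f (L.getD i []))).sum := by
  induction L with
  | nil => simp
  | cons x s ih =>
    rw [List.length_cons, List.range_succ_eq_map]
    simp only [List.map_cons, List.sum_cons, List.map_map, List.getD_cons_zero, ih]
    congr 2

-- B as the same arithmetic sum, under Pre_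
theorem pv_B_eq (r : List Int) (t : List (List Int))
    (hpre : ∀ row ∈ (r :: t), r.length ≤ row.length) :
    grad_energy_py_alt (r :: t) =
    ((List.range ((r :: t).length - 1)).map (fun i =>
        pvV r.length ((r :: t).getD i []) ((r :: t).getD (i + 1) []))).sum
    + ((List.range (r :: t).length).map (fun i => pvH r.length ((r :: t).getD i []))).sum := by
  unfold grad_energy_py_alt
  simp only [List.isEmpty_cons, if_neg, Bool.false_eq_true, not_false_eq_true, List.headD_cons]
  rw [show ((r :: t).map (fun row => PySem.List.slice row none (some (r.length : Int))))
      = (r :: t).map (fun row => row.take r.length) from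
    List.map_congr_left (fun row _ => PySem.List.slice_to_natCast row r.length)]
  have hlen : ∀ row ∈ (r :: t), (row.take r.length).length = r.length := by
    intro row hrow
    simp only [List.length_take]
    exact min_eq_left (hpre row hrow)
  -- horizontal part: sum of pvH over the original rows
  have hH : (((r :: t).map (fun row => row.take r.length)).map pvSeqEnergy).sum
      = ((List.range (r :: t).length).map (fun i => pvH r.length ((r :: t).getD i []))).sum := by
    rw [List.map_map]
    have h1 : (r :: t).map (pvSeqEnergy ∘ fun row => row.take r.length)
        = (r :: t).map (fun row => pvH r.length row) := by
      apply List.map_congr_left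
      intro row hrow
      simp only [Function.comp]
      rw [pv_seq_eq, hlen row hrow, pvH_take]
    rw [h1, pv_sum_map_eq_range]
  rw [hH]
  -- vertical part: columns of the truncated rows
  set rows := (r :: t).map (fun row => row.take r.length) with hrows
  have hV : ((pvZipStar rows).map pvSeqEnergy).sum
      = ((List.range ((r :: t).length - 1)).map (fun i =>
          pvV r.length ((r :: t).getD i []) ((r :: t).getD (i + 1) []))).sum := by
    have hzs : pvZipStar rows
        = (List.range r.length).map (fun j => rows.map (fun row => row.getD j 0)) := by
      rw [hrows]
      simp only [List.map_cons, pvZipStar]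
      rw [show (r.take r.length).length = r.length from hlen r List.mem_cons_self]
      rw [pv_foldl_min_const _ r.length (by
        intro x hx
        rcases List.mem_map.mp hx with ⟨row, hrow, rfl⟩
        exact hlen row (List.mem_cons_of_mem r hrow))]
    rw [hzs, List.map_map]
    have hcol : ∀ j < r.length, (pvSeqEnergy ∘ fun j => rows.map (fun row => row.getD j 0)) j
        = ((List.range ((r :: t).length - 1)).map (fun i =>
            let x := ((r :: t).getD i []).getD j 0
            let y := ((r :: t).getD (i+1) []).getD j 0
            (y - x) * (y - x))).sum := by
      intro j hj
      simp only [Function.comp]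
      rw [pv_seq_eq]
      have hclen : (rows.map (fun row => row.getD j 0)).length = (r :: t).length - 1 + 1 := by
        simp [hrows]
      unfold pvH
      rw [hclen]
      simp only [Nat.add_sub_cancel]
      apply congrArg
      apply List.map_congr_left
      intro i _
      rw [pv_getD_map_col, pv_getD_map_col, hrows, pv_getD_map_take, pv_getD_map_take,
          pv_getD_take _ _ _ hj, pv_getD_take _ _ _ hj]
    rw [List.map_congr_left (fun j hj => hcol j (List.mem_range.mp hj))]
    rw [pv_sum_comm]
    apply congrArg
    apply List.map_congr_left
    intro i _
    unfold pvV
    rfl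
  rw [hV, add_comm]
-- ===== VERDICT (by name: the statement is the Claim_ definition above) =====
theorem grad_energy_py_spec : Claim_equal_grad_energy_py := by
  intro grid _ hpre
  unfold Spec_grad_energy_py
  cases grid with
  | nil => rfl
  | cons r t =>
    rw [pv_A_eq, pv_B_eq r t (by simpa [Pre_grad_energy_py] using hpre)]
    rw [pv_sum_map_add, pv_sum_range_pred]
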